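-- pv_equiv track=rewrite | github.com/jhs9497/TIL | 개인문제풀이/SWEA/A형 모의고사/1493_4기_서울1반_옥종훈씨.py | findxy
-- ===== SOURCE A (Python) =====
-- def findxy(n): # ex) p가 6이면 n == 6
--     result = [0, 2] # 왜 시작이 여기지 ? 대각선 방향으로 진행시키기 위함임 p가 1일 때 (1,1)이 되어야 하니깐
--     cnt = 0
--     while cnt < n:
--         if result[1] == 1: # y축이 1이면
--             result[1] = result[0] + 1 # y축은 x축 + 1 -> 새로운 대각선의 맨 위쪽
--             result[0] = 1 # x축은 1 -> 새로운 대각선의 맨 왼쪽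
--         else: # 그렇지 않으면
--             result[0] += 1 # x축은 1씩 더해주고
--             result[1] -= 1 # y축은 1씩 빼준다..?  --> 우하향하라
--         cnt += 1
--     return result[0], result[1]
-- ===== SOURCE B (Python) =====
-- def findxy(n):
--     # O(log n): binary-search the diagonal d with T(d-1) < n <= T(d), then offset.
--     if n <= 0:
--         return (0, 2)
--     lo, hi = 1, n
--     while lo < hi:
--         mid = (lo + hi) // 2
--         if mid * (mid + 1) // 2 >= n:
--             hi = mid
--         else:
--             lo = mid + 1
--     d = lo
--     k = n - d * (d - 1) // 2
--     return (k, d - k + 1)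
-- ===== Notes on version B (the rewrite author's own statement) =====
-- stated objective: faster
-- what changed: Replaced the n-step diagonal-walk simulation by a binary search for the diagonal index via triangular numbers plus an O(1) offset computation.
import Mathlib
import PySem

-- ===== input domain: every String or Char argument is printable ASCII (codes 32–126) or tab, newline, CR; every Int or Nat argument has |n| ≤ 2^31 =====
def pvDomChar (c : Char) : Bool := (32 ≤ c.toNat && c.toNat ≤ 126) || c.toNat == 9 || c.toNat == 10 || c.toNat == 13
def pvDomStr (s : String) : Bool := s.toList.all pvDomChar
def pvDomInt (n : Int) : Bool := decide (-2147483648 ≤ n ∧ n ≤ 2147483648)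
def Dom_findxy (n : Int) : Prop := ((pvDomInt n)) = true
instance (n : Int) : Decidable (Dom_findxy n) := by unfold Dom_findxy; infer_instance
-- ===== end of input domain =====

-- B replaces A's n-step diagonal walk by a binary search over triangular numbers (O(log n)).

-- ===== PORT A =====
-- one iteration of A's while-loop body
def findxyStep (p : Int × Int) : Int × Int :=
  if p.2 = 1 then (1, p.1 + 1) else (p.1 + 1, p.2 - 1)

-- `while cnt < n` executed as many times as Python does: max n 0 = n.toNat iterations
def findxyLoop : Nat → Int × Int → Int × Int
  | 0, s => s
  | k + 1, s => findxyLoop k (findxyStep s)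

def findxy (n : Int) : List Int :=
  let r := findxyLoop n.toNat (0, 2)
  [r.1, r.2]

-- ===== PORT B =====
-- the `while lo < hi` binary search of Source B
def findxyBsearch (n lo hi : Int) : Int :=
  if h : lo < hi then
    let mid := PySem.Int.floordiv (lo + hi) 2
    if PySem.Int.floordiv (mid * (mid + 1)) 2 ≥ n then findxyBsearch n lo mid
    else findxyBsearch n (mid + 1) hi
  else lo
termination_by (hi - lo).toNat
decreasing_by
  · have := PySem.Int.floordiv_two_mid_bounds (le_of_lt h)
    have h2 : PySem.Int.floordiv (lo + hi) 2 < hi := by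
      rw [PySem.Int.floordiv_eq_ediv_of_pos (by omega : (0:Int) < 2)] at this ⊢
      omega
    omega
  · have := PySem.Int.floordiv_two_mid_bounds (le_of_lt h)
    omega

def findxy_alt (n : Int) : List Int :=
  if n ≤ 0 then [0, 2]
  else
    let d := findxyBsearch n 1 n
    let k := n - PySem.Int.floordiv (d * (d - 1)) 2
    [k, d - k + 1]

-- ===== PRECONDITION & SPEC =====
def Spec_findxy (n : Int) (out : List Int) : Prop := out = findxy_alt n
instance (n : Int) (out : List Int) : Decidable (Spec_findxy n out) := by unfold Spec_findxy; infer_instance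

-- ===== CLAIM (what is proved, stated in full; the proofs are below) =====
def Claim_equal_findxy : Prop := ∀ (n : Int), Dom_findxy n → Spec_findxy n (findxy n)

-- ===== LEMMAS AND PROOFS =====

-- triangular numbers, proof-side
def triN : Nat → Nat
  | 0 => 0
  | d + 1 => triN d + (d + 1)

theorem triN_cast (m : Nat) : 2 * ((triN m : Nat) : Int) = (m : Int) * (m + 1) := by
  induction m with
  | zero => simp [triN]
  | succ d ih => simp only [triN]; push_cast; push_cast at ih; ring_nf; ring_nf at ih; omega

theorem findxyLoop_succ (k : Nat) (s : Int × Int) :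
    findxyLoop (k + 1) s = findxyStep (findxyLoop k s) := by
  induction k generalizing s with
  | zero => rfl
  | succ m ih => rw [findxyLoop]; rw [ih]; rfl

-- closed form for A's walk: after triN (d-1) + k steps (1 ≤ k ≤ d) we sit at (k, d+1-k)
theorem findxyLoop_closed :
    ∀ (t d k : Nat), 1 ≤ k → k ≤ d → t = triN (d - 1) + k →
      findxyLoop t (0, 2) = ((k : Int), (d : Int) + 1 - k) := by
  intro t
  induction t with
  | zero => intro d k hk hkd ht; omega
  | succ t ih =>
    intro d k hk hkd ht
    rw [findxyLoop_succ]
    by_cases hk1 : k = 1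
    · subst hk1
      by_cases hd1 : d = 1
      · subst hd1
        simp only [triN] at ht
        have : t = 0 := by omega
        subst this
        simp [findxyLoop, findxyStep]
      · -- d ≥ 2 : previous position is the bottom of the previous diagonal, (d-1, 1)
        have hd2 : 2 ≤ d := by omega
        have hprev : t = triN (d - 2) + (d - 1) := by
          have h1 : d - 1 = (d - 2) + 1 := by omega
          rw [h1] at ht
          simp only [triN] at ht
          omega
        have := ih (d - 1) (d - 1) (by omega) (le_refl _) (by rw [hprev]; congr 1)
        rw [this]
        simp only [findxyStep]
        rw [if_pos (by ring)]
        simp only [Prod.mk.injEq]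
        push_cast [Nat.cast_sub (by omega : 1 ≤ d)]
        constructor
        · norm_num
        · ring
    · -- k ≥ 2 : previous position is one step up-right on the same diagonal
      have := ih d (k - 1) (by omega) (by omega) (by omega)
      rw [this]
      simp only [findxyStep]
      have hy : ((k : Nat) - 1 : Nat) = (k : Int) - 1 := by push_cast [Nat.cast_sub (by omega : 1 ≤ k)]; ring
      rw [hy]
      have hne : (d : Int) + 1 - ((k : Int) - 1) ≠ 1 := by
        have : (k : Int) ≤ d := by exact_mod_cast hkd
        omega
      simp only [if_neg hne, Prod.mk.injEq]
      constructor <;> ring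

-- the binary search returns the unique d with (d-1)d < 2n ≤ d(d+1), staying in [lo, hi]
theorem findxyBsearch_correct :
    ∀ (n lo hi : Int), 1 ≤ lo → lo ≤ hi →
      (lo - 1) * lo < 2 * n → 2 * n ≤ hi * (hi + 1) →
      let r := findxyBsearch n lo hi
      lo ≤ r ∧ r ≤ hi ∧ (r - 1) * r < 2 * n ∧ 2 * n ≤ r * (r + 1) := by
  intro n lo hi
  fun_induction findxyBsearch n lo hi with
  | case1 lo hi h mid hge ih =>
    intro hlo hlh hlow hhigh
    have hmid := PySem.Int.floordiv_two_mid_bounds (le_of_lt h)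
    have hmidlt : mid < hi := by
      show PySem.Int.floordiv (lo + hi) 2 < hi
      rw [PySem.Int.floordiv_eq_ediv_of_pos (by omega : (0:Int) < 2)]
      omega
    have heven : 2 * PySem.Int.floordiv (mid * (mid + 1)) 2 = mid * (mid + 1) := by
      rcases Int.even_mul_succ_self mid with ⟨q, hq⟩
      have : mid * (mid + 1) = 2 * q := by omega
      rw [this, PySem.Int.floordiv_eq_ediv_of_pos (by omega : (0:Int) < 2)]
      omega
    have h2 : 2 * n ≤ mid * (mid + 1) := by omega
    have := ih hlo hmid.1 hlow h2
    exact ⟨this.1, le_trans this.2.1 (le_of_lt hmidlt), this.2.2⟩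
  | case2 lo hi h mid hge ih =>
    intro hlo hlh hlow hhigh
    have hmid := PySem.Int.floordiv_two_mid_bounds (le_of_lt h)
    have heven : 2 * PySem.Int.floordiv (mid * (mid + 1)) 2 = mid * (mid + 1) := by
      rcases Int.even_mul_succ_self mid with ⟨q, hq⟩
      have : mid * (mid + 1) = 2 * q := by omega
      rw [this, PySem.Int.floordiv_eq_ediv_of_pos (by omega : (0:Int) < 2)]
      omega
    have hmidlt : mid < hi := by
      show PySem.Int.floordiv (lo + hi) 2 < hi
      rw [PySem.Int.floordiv_eq_ediv_of_pos (by omega : (0:Int) < 2)]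
      omega
    have hlow' : ((mid + 1) - 1) * (mid + 1) < 2 * n := by
      have : mid * (mid + 1) < 2 * n := by omega
      linarith
    have hres := ih (by omega) (by omega) hlow' hhigh
    exact ⟨by have := hres.1; omega, hres.2.1, hres.2.2⟩
  | case3 lo hi h =>
    intro hlo hlh hlow hhigh
    have : lo = hi := by omega
    subst this
    exact ⟨le_refl _, le_refl _, hlow, hhigh⟩

-- ===== VERDICT (by name: the statement is the Claim_ definition above) =====
theorem findxy_spec : Claim_equal_findxy := by
  intro n _
  unfold Spec_findxy findxy findxy_alt
  by_cases hn : n ≤ 0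
  · have : n.toNat = 0 := by omega
    simp [this, hn, findxyLoop]
  · have hn' : 0 < n := by omega
    simp only [if_neg hn]
    have hres := findxyBsearch_correct n 1 n (le_refl 1) (by omega)
      (by ring_nf; omega) (by nlinarith)
    set r := findxyBsearch n 1 n with hr
    obtain ⟨h1r, hrn, hlow, hhigh⟩ := hres
    -- d := r.toNat, k := n - triN (d-1)
    set d : Nat := r.toNat with hd
    have hrd : (d : Int) = r := by omega
    have hd1 : 1 ≤ d := by omega
    have htri_lt : (triN (d - 1) : Int) < n := by
      have hc := triN_cast (d - 1)
      have : ((d : Nat) - 1 : Nat) = (r - 1 : Int) := by push_cast [Nat.cast_sub hd1]; omega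
      rw [this] at hc
      have : (r - 1) * (r - 1 + 1) = (r - 1) * r := by ring
      omega
    have htri_ge : n ≤ (triN (d - 1) : Int) + d := by
      have hc := triN_cast (d - 1)
      have he : ((d : Nat) - 1 : Nat) = (r - 1 : Int) := by push_cast [Nat.cast_sub hd1]; omega
      rw [he] at hc
      have h2 : (r - 1) * (r - 1 + 1) = r * (r + 1) - 2 * r := by ring
      omega
    have hflo : PySem.Int.floordiv (r * (r - 1)) 2 = (triN (d - 1) : Int) := by
      have hc := triN_cast (d - 1)
      have he : ((d : Nat) - 1 : Nat) = (r - 1 : Int) := by push_cast [Nat.cast_sub hd1]; omega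
      rw [he] at hc
      have hq : r * (r - 1) = 2 * (triN (d - 1) : Int) := by rw [hc]; ring
      rw [hq, PySem.Int.floordiv_eq_ediv_of_pos (by omega : (0:Int) < 2)]
      omega
    set kN : Nat := n.toNat - triN (d - 1) with hkN
    have hkN1 : 1 ≤ kN := by omega
    have hkNd : kN ≤ d := by omega
    have hL := findxyLoop_closed n.toNat d kN hkN1 hkNd (by omega)
    rw [hL]
    have hkcast : ((kN : Nat) : Int) = n - PySem.Int.floordiv (r * (r - 1)) 2 := by
      rw [hflo]; omega
    simp only [List.cons.injEq]
    refine ⟨by rw [hkcast], by rw [hkcast, hrd]; ring, trivial⟩
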